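-- pv_equiv track=rewrite | github.com/KaushikSiva/lingua-code | app/transliteration.py | infer_label_from_romanized
-- ===== SOURCE A (Python) =====
-- def infer_label_from_romanized(text: str) -> str:
--     lowered = f" {text.lower()} "
--     tamil_signals = (" irukku ", " illa ", " venum ", " pannu ", " appo ", " ippo ")
--     bengali_signals = (" ami ", " tumi ", " ache ", " hobe ", " koro ", " kalke ")
--     hindi_signals = (" hai ", " nahi ", " kya ", " kal ", " mera ", " karna ")
--     if any(signal in lowered for signal in tamil_signals):
--         return "tanglish"
--     if any(signal in lowered for signal in bengali_signals):
--         return "banglish"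
--     if any(signal in lowered for signal in hindi_signals):
--         return "hinglish"
--     return "hinglish"
-- ===== SOURCE B (Python) =====
-- _TAMIL_WORDS = ("irukku", "illa", "venum", "pannu", "appo", "ippo")
-- _BENGALI_WORDS = ("ami", "tumi", "ache", "hobe", "koro", "kalke")
-- # hindi signal words need no table: their tier and the final fallback yield the same default label
--
-- def infer_label_from_romanized(text: str) -> str:
--     found = set()
--     for token in text.lower().split(' '):
--         if token in _TAMIL_WORDS:
--             found.add("tanglish")
--         elif token in _BENGALI_WORDS:
--             found.add("banglish")
--     if "tanglish" in found:
--         return "tanglish"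
--     if "banglish" in found:
--         return "banglish"
--     return "hinglish"
-- ===== Notes on version B (the rewrite author's own statement) =====
-- stated objective: idiomatic
-- what changed: Replaces three independent padded-substring scans (one per language tier) with a single tokenization on the literal space followed by one pass over the tokens against two signal-word tables collecting the set of matched labels; the hindi word table disappears because its tier and the final fallback produce the same default label.
import Mathlib
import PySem

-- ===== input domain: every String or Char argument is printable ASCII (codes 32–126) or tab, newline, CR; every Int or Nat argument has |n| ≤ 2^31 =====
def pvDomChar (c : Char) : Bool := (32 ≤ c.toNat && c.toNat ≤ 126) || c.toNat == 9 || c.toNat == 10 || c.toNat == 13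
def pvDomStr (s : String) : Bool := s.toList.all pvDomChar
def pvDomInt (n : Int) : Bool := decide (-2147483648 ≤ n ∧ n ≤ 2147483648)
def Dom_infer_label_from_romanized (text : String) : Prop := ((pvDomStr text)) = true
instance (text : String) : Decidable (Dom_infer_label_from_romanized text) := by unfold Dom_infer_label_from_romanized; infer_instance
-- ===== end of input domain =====

-- B replaces A's three fixed substring scans by one tokenization on ' ' plus a single dict-indexed pass (idiomatic; not claimed faster).

-- ===== PORT A =====
def tamilSignalsA : List (List Char) :=
  [" irukku ".toList, " illa ".toList, " venum ".toList, " pannu ".toList, " appo ".toList, " ippo ".toList]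
def bengaliSignalsA : List (List Char) :=
  [" ami ".toList, " tumi ".toList, " ache ".toList, " hobe ".toList, " koro ".toList, " kalke ".toList]
def hindiSignalsA : List (List Char) :=
  [" hai ".toList, " nahi ".toList, " kya ".toList, " kal ".toList, " mera ".toList, " karna ".toList]

def infer_label_from_romanized (text : String) : String :=
  let lowered := " ".toList ++ PySem.Chars.lower text.toList ++ " ".toList
  if tamilSignalsA.any (fun signal => PySem.Chars.isIn signal lowered) then "tanglish"
  else if bengaliSignalsA.any (fun signal => PySem.Chars.isIn signal lowered) then "banglish"
  else if hindiSignalsA.any (fun signal => PySem.Chars.isIn signal lowered) then "hinglish"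
  else "hinglish"

-- ===== PORT B =====
def tamilWordsB : List (List Char) :=
  ["irukku".toList, "illa".toList, "venum".toList, "pannu".toList, "appo".toList, "ippo".toList]
def bengaliWordsB : List (List Char) :=
  ["ami".toList, "tumi".toList, "ache".toList, "hobe".toList, "koro".toList, "kalke".toList]

-- str.split(' ') on a single-character separator is exactly Mathlib's List.splitOn ' '
def infer_label_from_romanized_alt (text : String) : String :=
  let tokens := (PySem.Chars.lower text.toList).splitOn ' '
  let found := tokens.foldl
    (fun (s : PySem.Set String) tok =>
      if tamilWordsB.contains tok then s.add "tanglish"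
      else if bengaliWordsB.contains tok then s.add "banglish"
      else s) PySem.Set.empty
  if found.contains "tanglish" then "tanglish"
  else if found.contains "banglish" then "banglish"
  else "hinglish"

-- ===== PRECONDITION & SPEC =====
def Spec_infer_label_from_romanized (text : String) (out : String) : Prop := out = infer_label_from_romanized_alt text
instance (text : String) (out : String) : Decidable (Spec_infer_label_from_romanized text out) := by unfold Spec_infer_label_from_romanized; infer_instance

-- ===== CLAIM (what is proved, stated in full; the proofs are below) =====
def Claim_equal_infer_label_from_romanized : Prop := ∀ (text : String), Dom_infer_label_from_romanized text → Spec_infer_label_from_romanized text (infer_label_from_romanized text)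

-- ===== LEMMAS AND PROOFS =====

theorem splitOn_exists_cons (t : List Char) : ∃ h tl, t.splitOn ' ' = h :: tl := by
  rcases e : t.splitOn ' ' with _ | ⟨h, tl⟩
  · exact absurd e (List.splitOnP_ne_nil _ _)
  · exact ⟨h, tl, rfl⟩

theorem splitOn_cons_space (t : List Char) : (' ' :: t).splitOn ' ' = [] :: t.splitOn ' ' := by
  simp [List.splitOn, List.splitOnP_cons]

theorem splitOn_cons_ne {c : Char} (hc : c ≠ ' ') (t : List Char) {h : List Char} {tl : List (List Char)}
    (hht : t.splitOn ' ' = h :: tl) : (c :: t).splitOn ' ' = (c :: h) :: tl := by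
  simp [List.splitOn, List.splitOnP_cons, hc]
  rw [show List.splitOnP (fun x => x == ' ') t = t.splitOn ' ' from rfl, hht]
  rfl

-- "w followed by a space" is a prefix of "s followed by a space" exactly when w is the first token of s
theorem prefix_iff_head_splitOn (s : List Char) :
    ∀ w : List Char, ' ' ∉ w →
      ((w ++ [' ']) <+: (s ++ [' ']) ↔ (s.splitOn ' ').head? = some w) := by
  induction s with
  | nil =>
    intro w hw
    constructor
    · intro h
      have := h.length_le
      simp at this
      simp [this]
    · intro h
      simp [List.splitOn, List.splitOnP_nil] at h
      simp [h]
  | cons c t ih =>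
    intro w hw
    by_cases hc : c = ' '
    · subst hc
      cases w with
      | nil => simp [splitOn_cons_space]
      | cons a w' =>
        have ha : a ≠ ' ' := fun h => hw (h ▸ List.mem_cons_self ..)
        simp [splitOn_cons_space, List.cons_prefix_cons]
        intro h; exact absurd h.symm (fun h' => ha h'.symm)
    · obtain ⟨h, tl, hht⟩ := splitOn_exists_cons t
      rw [splitOn_cons_ne hc t hht]
      cases w with
      | nil =>
        simp [List.cons_prefix_cons]
        intro h'; exact absurd h'.symm hc
      | cons a w' =>
        have hw' : ' ' ∉ w' := fun hm => hw (List.mem_cons_of_mem _ hm)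
        have ihw := ih w' hw'
        rw [hht] at ihw
        simp only [List.cons_append, List.cons_prefix_cons, ihw, List.head?_cons,
          Option.some.injEq, List.cons.injEq]
        tauto

-- " w " occurring in "s " (no leading pad) means w is a non-first token of s
theorem infix_iff_mem_tail (w : List Char) (hsp : ' ' ∉ w) :
    ∀ s : List Char, ((' ' :: (w ++ [' '])) <:+: (s ++ [' '])) ↔ w ∈ (s.splitOn ' ').tail := by
  intro s
  induction s with
  | nil =>
    constructor
    · intro hinf
      have := hinf.length_le
      simp at this
    · intro hm
      simp [List.splitOn, List.splitOnP_nil] at hm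
  | cons c t ih =>
    rw [List.cons_append, List.infix_cons_iff]
    obtain ⟨h, tl, hht⟩ := splitOn_exists_cons t
    by_cases hc : c = ' '
    · subst hc
      rw [splitOn_cons_space]
      have hpre := prefix_iff_head_splitOn t w hsp
      rw [hht] at hpre
      constructor
      · rintro (hp | hinf)
        · rw [List.cons_prefix_cons] at hp
          have hwh : h = w := by
            have := hpre.mp hp.2
            simpa using this
          rw [hht, List.tail_cons, hwh]
          exact List.mem_cons_self ..
        · have := ih.mp hinf
          rw [hht] at this
          rw [hht, List.tail_cons]
          exact List.mem_cons_of_mem _ this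
      · intro hm
        rw [hht, List.tail_cons] at hm
        rcases List.mem_cons.mp hm with rfl | hm'
        · left
          rw [List.cons_prefix_cons]
          exact ⟨rfl, hpre.mpr (by simp)⟩
        · right
          apply ih.mpr
          rw [hht]
          exact hm'
    · rw [splitOn_cons_ne hc t hht, List.tail_cons]
      constructor
      · rintro (hp | hinf)
        · rw [List.cons_prefix_cons] at hp
          exact absurd hp.1 (fun h' => hc h'.symm)
        · have := ih.mp hinf
          rw [hht, List.tail_cons] at this
          exact this
      · intro hm
        refine Or.inr (ih.mpr ?_)
        rw [hht, List.tail_cons]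
        exact hm

-- MAIN TOKEN LEMMA: " w " occurs in " s " exactly when w is a space-separated token of s
theorem infix_iff_mem_splitOn (w s : List Char) (hsp : ' ' ∉ w) :
    (' ' :: (w ++ [' '])) <:+: (' ' :: (s ++ [' '])) ↔ w ∈ s.splitOn ' ' := by
  have := infix_iff_mem_tail w hsp (' ' :: s)
  rw [splitOn_cons_space, List.tail_cons] at this
  simpa using this

-- B's accumulation loop, specialised to each label (the two word lists are disjoint)
theorem found_tanglish_iff (tokens : List (List Char)) :
    ∀ s : PySem.Set String,
      (("tanglish" : String) ∈ tokens.foldl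
        (fun (s : PySem.Set String) tok =>
          if tamilWordsB.contains tok then s.add "tanglish"
          else if bengaliWordsB.contains tok then s.add "banglish"
          else s) s) ↔ ("tanglish" : String) ∈ s ∨ ∃ tok ∈ tokens, tok ∈ tamilWordsB := by
  induction tokens with
  | nil => intro s; simp
  | cons t rest ih =>
    intro s
    by_cases ht : tamilWordsB.contains t = true
    · have htm : t ∈ tamilWordsB := by simpa using ht
      rw [List.foldl_cons, if_pos ht, ih]
      simp only [PySem.Set.mem_add, List.mem_cons]
      constructor
      · rintro ((h | h) | ⟨tok, hm, he⟩)
        · exact Or.inl h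
        · exact Or.inr ⟨t, Or.inl rfl, htm⟩
        · exact Or.inr ⟨tok, Or.inr hm, he⟩
      · rintro (h | ⟨tok, rfl | hm, he⟩)
        · exact Or.inl (Or.inl h)
        · exact Or.inl (Or.inr trivial)
        · exact Or.inr ⟨tok, hm, he⟩
    · have hnt : t ∉ tamilWordsB := fun hm => ht (by simpa using hm)
      by_cases hb : bengaliWordsB.contains t = true
      · rw [List.foldl_cons, if_neg ht, if_pos hb, ih]
        simp only [PySem.Set.mem_add, List.mem_cons]
        constructor
        · rintro ((h | h) | ⟨tok, hm, he⟩)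
          · exact Or.inl h
          · exact absurd h (by decide)
          · exact Or.inr ⟨tok, Or.inr hm, he⟩
        · rintro (h | ⟨tok, rfl | hm, he⟩)
          · exact Or.inl (Or.inl h)
          · exact absurd he hnt
          · exact Or.inr ⟨tok, hm, he⟩
      · rw [List.foldl_cons, if_neg ht, if_neg hb, ih]
        simp only [List.mem_cons]
        constructor
        · rintro (h | ⟨tok, hm, he⟩)
          · exact Or.inl h
          · exact Or.inr ⟨tok, Or.inr hm, he⟩
        · rintro (h | ⟨tok, rfl | hm, he⟩)
          · exact Or.inl h
          · exact absurd he hnt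
          · exact Or.inr ⟨tok, hm, he⟩

theorem found_banglish_iff (tokens : List (List Char)) :
    ∀ s : PySem.Set String,
      (("banglish" : String) ∈ tokens.foldl
        (fun (s : PySem.Set String) tok =>
          if tamilWordsB.contains tok then s.add "tanglish"
          else if bengaliWordsB.contains tok then s.add "banglish"
          else s) s) ↔ ("banglish" : String) ∈ s ∨ ∃ tok ∈ tokens, tok ∈ bengaliWordsB := by
  induction tokens with
  | nil => intro s; simp
  | cons t rest ih =>
    intro s
    by_cases ht : tamilWordsB.contains t = true
    · have hnb : t ∉ bengaliWordsB := by
        have htm : t ∈ tamilWordsB := by simpa using ht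
        simp only [tamilWordsB, List.mem_cons, List.not_mem_nil, or_false] at htm
        rcases htm with rfl | rfl | rfl | rfl | rfl | rfl <;> decide
      rw [List.foldl_cons, if_pos ht, ih]
      simp only [PySem.Set.mem_add, List.mem_cons]
      constructor
      · rintro ((h | h) | ⟨tok, hm, he⟩)
        · exact Or.inl h
        · exact absurd h (by decide)
        · exact Or.inr ⟨tok, Or.inr hm, he⟩
      · rintro (h | ⟨tok, rfl | hm, he⟩)
        · exact Or.inl (Or.inl h)
        · exact absurd he hnb
        · exact Or.inr ⟨tok, hm, he⟩
    · by_cases hb : bengaliWordsB.contains t = true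
      · have hbm : t ∈ bengaliWordsB := by simpa using hb
        rw [List.foldl_cons, if_neg ht, if_pos hb, ih]
        simp only [PySem.Set.mem_add, List.mem_cons]
        constructor
        · rintro ((h | h) | ⟨tok, hm, he⟩)
          · exact Or.inl h
          · exact Or.inr ⟨t, Or.inl rfl, hbm⟩
          · exact Or.inr ⟨tok, Or.inr hm, he⟩
        · rintro (h | ⟨tok, rfl | hm, he⟩)
          · exact Or.inl (Or.inl h)
          · exact Or.inl (Or.inr trivial)
          · exact Or.inr ⟨tok, hm, he⟩
      · have hnb : t ∉ bengaliWordsB := fun hm => hb (by simpa using hm)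
        rw [List.foldl_cons, if_neg ht, if_neg hb, ih]
        simp only [List.mem_cons]
        constructor
        · rintro (h | ⟨tok, hm, he⟩)
          · exact Or.inl h
          · exact Or.inr ⟨tok, Or.inr hm, he⟩
        · rintro (h | ⟨tok, rfl | hm, he⟩)
          · exact Or.inl h
          · exact absurd he hnb
          · exact Or.inr ⟨tok, hm, he⟩

-- A's tamil substring scan agrees with B's tanglish flag
theorem tamil_cond_eq (low : List Char) :
    tamilSignalsA.any (fun signal => PySem.Chars.isIn signal (" ".toList ++ low ++ " ".toList)) =
      ((low.splitOn ' ').foldl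
        (fun (s : PySem.Set String) tok =>
          if tamilWordsB.contains tok then s.add "tanglish"
          else if bengaliWordsB.contains tok then s.add "banglish"
          else s) PySem.Set.empty).contains "tanglish" := by
  rw [Bool.eq_iff_iff, PySem.Set.contains_iff, found_tanglish_iff]
  simp only [PySem.Set.empty_eq, List.not_mem_nil, false_or]
  rw [show (" ".toList ++ low ++ " ".toList : List Char) = ' ' :: (low ++ [' ']) from rfl]
  simp only [tamilSignalsA, List.any_cons, List.any_nil, Bool.or_eq_true,
    PySem.Chars.isIn_iff_infix,
    show (" irukku ".toList : List Char) = ' ' :: ("irukku".toList ++ [' ']) from rfl,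
    show (" illa ".toList : List Char) = ' ' :: ("illa".toList ++ [' ']) from rfl,
    show (" venum ".toList : List Char) = ' ' :: ("venum".toList ++ [' ']) from rfl,
    show (" pannu ".toList : List Char) = ' ' :: ("pannu".toList ++ [' ']) from rfl,
    show (" appo ".toList : List Char) = ' ' :: ("appo".toList ++ [' ']) from rfl,
    show (" ippo ".toList : List Char) = ' ' :: ("ippo".toList ++ [' ']) from rfl,
    infix_iff_mem_splitOn "irukku".toList low (by decide),
    infix_iff_mem_splitOn "illa".toList low (by decide),
    infix_iff_mem_splitOn "venum".toList low (by decide),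
    infix_iff_mem_splitOn "pannu".toList low (by decide),
    infix_iff_mem_splitOn "appo".toList low (by decide),
    infix_iff_mem_splitOn "ippo".toList low (by decide)]
  constructor
  · rintro (h | h | h | h | h | h | h)
    · exact ⟨_, h, by simp [tamilWordsB]⟩
    · exact ⟨_, h, by simp [tamilWordsB]⟩
    · exact ⟨_, h, by simp [tamilWordsB]⟩
    · exact ⟨_, h, by simp [tamilWordsB]⟩
    · exact ⟨_, h, by simp [tamilWordsB]⟩
    · exact ⟨_, h, by simp [tamilWordsB]⟩
    · exact absurd h (by decide)
  · rintro ⟨tok, hm, he⟩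
    simp only [tamilWordsB, List.mem_cons, List.not_mem_nil, or_false] at he
    rcases he with rfl | rfl | rfl | rfl | rfl | rfl <;> tauto

-- A's bengali substring scan agrees with B's banglish flag
theorem bengali_cond_eq (low : List Char) :
    bengaliSignalsA.any (fun signal => PySem.Chars.isIn signal (" ".toList ++ low ++ " ".toList)) =
      ((low.splitOn ' ').foldl
        (fun (s : PySem.Set String) tok =>
          if tamilWordsB.contains tok then s.add "tanglish"
          else if bengaliWordsB.contains tok then s.add "banglish"
          else s) PySem.Set.empty).contains "banglish" := by
  rw [Bool.eq_iff_iff, PySem.Set.contains_iff, found_banglish_iff]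
  simp only [PySem.Set.empty_eq, List.not_mem_nil, false_or]
  rw [show (" ".toList ++ low ++ " ".toList : List Char) = ' ' :: (low ++ [' ']) from rfl]
  simp only [bengaliSignalsA, List.any_cons, List.any_nil, Bool.or_eq_true,
    PySem.Chars.isIn_iff_infix,
    show (" ami ".toList : List Char) = ' ' :: ("ami".toList ++ [' ']) from rfl,
    show (" tumi ".toList : List Char) = ' ' :: ("tumi".toList ++ [' ']) from rfl,
    show (" ache ".toList : List Char) = ' ' :: ("ache".toList ++ [' ']) from rfl,
    show (" hobe ".toList : List Char) = ' ' :: ("hobe".toList ++ [' ']) from rfl,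
    show (" koro ".toList : List Char) = ' ' :: ("koro".toList ++ [' ']) from rfl,
    show (" kalke ".toList : List Char) = ' ' :: ("kalke".toList ++ [' ']) from rfl,
    infix_iff_mem_splitOn "ami".toList low (by decide),
    infix_iff_mem_splitOn "tumi".toList low (by decide),
    infix_iff_mem_splitOn "ache".toList low (by decide),
    infix_iff_mem_splitOn "hobe".toList low (by decide),
    infix_iff_mem_splitOn "koro".toList low (by decide),
    infix_iff_mem_splitOn "kalke".toList low (by decide)]
  constructor
  · rintro (h | h | h | h | h | h | h)
    · exact ⟨_, h, by simp [bengaliWordsB]⟩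
    · exact ⟨_, h, by simp [bengaliWordsB]⟩
    · exact ⟨_, h, by simp [bengaliWordsB]⟩
    · exact ⟨_, h, by simp [bengaliWordsB]⟩
    · exact ⟨_, h, by simp [bengaliWordsB]⟩
    · exact ⟨_, h, by simp [bengaliWordsB]⟩
    · exact absurd h (by decide)
  · rintro ⟨tok, hm, he⟩
    simp only [bengaliWordsB, List.mem_cons, List.not_mem_nil, or_false] at he
    rcases he with rfl | rfl | rfl | rfl | rfl | rfl <;> tauto

-- ===== VERDICT (by name: the statement is the Claim_ definition above) =====
theorem infer_label_from_romanized_spec : Claim_equal_infer_label_from_romanized := by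
  intro text _
  unfold Spec_infer_label_from_romanized infer_label_from_romanized infer_label_from_romanized_alt
  simp only []
  rw [← tamil_cond_eq, ← bengali_cond_eq]
  split_ifs <;> rfl
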